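-- pv_equiv track=rewrite | github.com/naylence/naylence-agent-sdk-python | scripts/generate_docs.py | convert_doctest_to_codeblock
-- ===== SOURCE A (Python) =====
-- def convert_doctest_to_codeblock(docstring: str) -> str:
--     """Convert doctest-style examples (>>> ...) to Markdown code blocks.
--
--     Finds sections that look like:
--         Example:
--             >>> code here
--             ... continuation
--             output
--
--     And converts them to:
--         **Example:**
--
--         ```python
--         code here
--         continuation
--         ```
--     """
--     lines = docstring.split('\n')
--     result = []
--     i = 0
--
--     while i < len(lines):
--         line = lines[i]
--
--         # Check if this line starts a doctest block (>>> at any indentation)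
--         stripped = line.lstrip()
--         if stripped.startswith('>>>'):
--             # Collect all doctest lines
--             code_lines = []
--             # Track the base indentation of the first >>> line's code
--             # first_code_indent = None
--
--             while i < len(lines):
--                 current = lines[i]
--                 current_stripped = current.lstrip()
--
--                 # Check if still in doctest block
--                 if current_stripped.startswith('>>>'):
--                     # Remove >>> prefix
--                     code_after_prompt = current_stripped[3:]
--                     # Remove exactly one space after >>> if present
--                     if code_after_prompt.startswith(' '):
--                         code_after_prompt = code_after_prompt[1:]
--
--                     if code_after_prompt or code_after_prompt == '':
--                         code_lines.append(code_after_prompt)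
--                     i += 1
--                 elif current_stripped.startswith('...'):
--                     # Continuation line - remove ... prefix
--                     code_after_prompt = current_stripped[3:]
--                     # Remove exactly one space after ... if present
--                     if code_after_prompt.startswith(' '):
--                         code_after_prompt = code_after_prompt[1:]
--                     code_lines.append(code_after_prompt)
--                     i += 1
--                 elif current_stripped == '':
--                     # Empty line - could be within doctest or end
--                     # Look ahead to see if more doctest follows
--                     if i + 1 < len(lines):
--                         next_stripped = lines[i + 1].lstrip()
--                         if next_stripped.startswith('>>>') or next_stripped.startswith('...'):
--                             code_lines.append('')
--                             i += 1
--                             continue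
--                     # End of doctest block
--                     break
--                 else:
--                     # End of doctest block (could be output or next section)
--                     break
--
--             # Output the code block
--             if code_lines:
--                 result.append('')
--                 result.append('```python')
--                 result.extend(code_lines)
--                 result.append('```')
--                 result.append('')
--         else:
--             result.append(line)
--             i += 1
--
--     return '\n'.join(result)
-- ===== SOURCE B (Python) =====
-- def convert_doctest_to_codeblock(docstring: str) -> str:
--     """Convert doctest-style examples (>>> ...) to Markdown code blocks.
--
--     Single pass: an in-block buffer `code` collects stripped prompt lines and is
--     flushed as a fenced ```python block when the doctest section ends.
--     """
--     lines = docstring.split('\n')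
--     out = []
--     code = []
--
--     def flush():
--         out.extend(['', '```python'])
--         out.extend(code)
--         out.extend(['```', ''])
--         code.clear()
--
--     for idx, line in enumerate(lines):
--         s = line.lstrip()
--         if code:
--             if s.startswith('>>>') or s.startswith('...'):
--                 t = s[3:]
--                 code.append(t[1:] if t.startswith(' ') else t)
--                 continue
--             if s == '' and idx + 1 < len(lines) and \
--                     lines[idx + 1].lstrip().startswith(('>>>', '...')):
--                 code.append('')
--                 continue
--             flush()
--         if s.startswith('>>>'):
--             t = s[3:]
--             code.append(t[1:] if t.startswith(' ') else t)
--         else: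
--             out.append(line)
--     if code:
--         flush()
--     return '\n'.join(out)
-- ===== Notes on version B (the rewrite author's own statement) =====
-- stated objective: simpler
-- what changed: Replaced A's outer loop with a nested inner while over the doctest block by a single pass over the lines that keeps an in-block code buffer and flushes it as a fenced block when the section ends.
import Mathlib
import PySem

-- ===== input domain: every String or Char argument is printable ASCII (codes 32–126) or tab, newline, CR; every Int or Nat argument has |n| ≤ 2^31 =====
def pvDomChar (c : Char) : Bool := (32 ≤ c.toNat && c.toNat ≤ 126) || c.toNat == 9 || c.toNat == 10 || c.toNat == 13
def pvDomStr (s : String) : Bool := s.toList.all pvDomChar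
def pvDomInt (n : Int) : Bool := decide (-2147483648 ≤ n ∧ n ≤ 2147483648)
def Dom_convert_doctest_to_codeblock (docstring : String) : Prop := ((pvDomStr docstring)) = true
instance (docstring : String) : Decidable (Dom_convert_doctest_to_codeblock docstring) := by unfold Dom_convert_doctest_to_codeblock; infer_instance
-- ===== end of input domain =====

-- B replaces A's outer-loop-plus-nested-inner-while with one single pass keeping an
-- in-block code buffer that is flushed as a fenced block when the doctest section ends
-- (objective: simpler decomposition; same cost).

-- shared transliterations of Python lines identical in A and B:
--   code_after_prompt = stripped[3:];  if it startswith ' ': drop one space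
def pvCodeAfter (s : String) : String :=
  let t := PySem.Str.slice s (some 3) none
  if PySem.Str.startswith t " " then PySem.Str.slice t (some 1) none else t

--   the blank-line lookahead: i+1 < len(lines) and lines[i+1].lstrip() starts '>>>' or '...'
def pvLook : List String → Bool
  | next :: _ =>
      PySem.Str.startswith (PySem.Str.lstrip next) ">>>"
        || PySem.Str.startswith (PySem.Str.lstrip next) "..."
  | [] => false

-- ===== PORT A =====
-- A's inner `while i < len(lines)` loop: (remaining lines, code_lines) → (code_lines, remaining lines at break)
def pvAInner : List String → List String → (List String × List String)
  | [], code => (code, [])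
  | cur :: rest, code =>
    let cs := PySem.Str.lstrip cur
    if PySem.Str.startswith cs ">>>" then
      let t := pvCodeAfter cs
      -- Python's `if code_after_prompt or code_after_prompt == '':` is always true
      pvAInner rest (if t ≠ "" ∨ t = "" then code ++ [t] else code)
    else if PySem.Str.startswith cs "..." then
      pvAInner rest (code ++ [pvCodeAfter cs])
    else if cs = "" then
      if pvLook rest then pvAInner rest (code ++ [""])
      else (code, cur :: rest)            -- break (line not consumed)
    else (code, cur :: rest)              -- break (line not consumed)

-- the inner loop never lengthens the remaining-line list (needed for termination of the outer loop)
theorem pvAInner_len : ∀ (xs code : List String), (pvAInner xs code).2.length ≤ xs.length := by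
  intro xs
  induction xs with
  | nil => intro code; simp [pvAInner]
  | cons cur rest ih =>
    intro code
    simp only [pvAInner]
    split_ifs
    all_goals first | exact Nat.le_succ_of_le (ih _) | simp

theorem pvAInner_cons_gt (l : String) (rest code : List String)
    (h : PySem.Str.startswith (PySem.Str.lstrip l) ">>>" = true) :
    pvAInner (l :: rest) code
      = pvAInner rest (code ++ [pvCodeAfter (PySem.Str.lstrip l)]) := by
  simp only [pvAInner, h, if_true, ne_or_eq]

-- A's outer `while i < len(lines)` loop
def pvAOuter : List String → List String
  | [] => []
  | l :: rest =>
    let s := PySem.Str.lstrip l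
    if h : PySem.Str.startswith s ">>>" = true then
      let p := pvAInner (l :: rest) []
      (if p.1.isEmpty then [] else "" :: "```python" :: (p.1 ++ ["```", ""])) ++ pvAOuter p.2
    else l :: pvAOuter rest
termination_by xs => xs.length
decreasing_by
  · show (pvAInner (l :: rest) []).2.length < (l :: rest).length
    rw [pvAInner_cons_gt l rest [] h]
    exact Nat.lt_succ_of_le (pvAInner_len rest _)
  · simp

def convert_doctest_to_codeblock (docstring : String) : String :=
  PySem.Str.join "\n" (pvAOuter ((PySem.Str.split? docstring "\n").getD []))

-- ===== PORT B =====
def pvFlush (code : List String) : List String := ["", "```python"] ++ code ++ ["```", ""]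

-- B's single pass: `code` is the in-block buffer (nonempty ⇔ inside a doctest block)
def pvBGo : List String → List String → List String
  | [], code => if code.isEmpty then [] else pvFlush code
  | l :: rest, code =>
    let s := PySem.Str.lstrip l
    let keep? : Option (List String) :=   -- the `continue` cases while inside a block
      if code.isEmpty then none
      else if PySem.Str.startswith s ">>>" || PySem.Str.startswith s "..." then
        some (code ++ [pvCodeAfter s])
      else if s = "" ∧ pvLook rest = true then some (code ++ [""])
      else none
    match keep? with
    | some code' => pvBGo rest code'
    | none =>
      (if code.isEmpty then [] else pvFlush code)
        ++ (if PySem.Str.startswith s ">>>" then pvBGo rest [pvCodeAfter s]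
            else l :: pvBGo rest [])

def convert_doctest_to_codeblock_alt (docstring : String) : String :=
  PySem.Str.join "\n" (pvBGo ((PySem.Str.split? docstring "\n").getD []) [])

-- ===== PRECONDITION & SPEC =====
def Spec_convert_doctest_to_codeblock (docstring : String) (out : String) : Prop := out = convert_doctest_to_codeblock_alt docstring
instance (docstring : String) (out : String) : Decidable (Spec_convert_doctest_to_codeblock docstring out) := by unfold Spec_convert_doctest_to_codeblock; infer_instance

-- ===== CLAIM (what is proved, stated in full; the proofs are below) =====
def Claim_equal_convert_doctest_to_codeblock : Prop := ∀ (docstring : String), Dom_convert_doctest_to_codeblock docstring → Spec_convert_doctest_to_codeblock docstring (convert_doctest_to_codeblock docstring)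

-- ===== LEMMAS AND PROOFS =====

theorem pvAInner_cons_dots (l : String) (rest code : List String)
    (h1 : PySem.Str.startswith (PySem.Str.lstrip l) ">>>" = false)
    (h2 : PySem.Str.startswith (PySem.Str.lstrip l) "..." = true) :
    pvAInner (l :: rest) code
      = pvAInner rest (code ++ [pvCodeAfter (PySem.Str.lstrip l)]) := by
  simp only [pvAInner, h1, h2, Bool.false_eq_true, if_false, if_true]

theorem pvAInner_cons_blank_keep (l : String) (rest code : List String)
    (h1 : PySem.Str.startswith (PySem.Str.lstrip l) ">>>" = false)
    (h2 : PySem.Str.startswith (PySem.Str.lstrip l) "..." = false)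
    (h3 : PySem.Str.lstrip l = "") (h4 : pvLook rest = true) :
    pvAInner (l :: rest) code = pvAInner rest (code ++ [""]) := by
  simp only [pvAInner, h1, h2, Bool.false_eq_true, if_false]
  rw [if_pos h3, if_pos h4]

theorem pvAInner_cons_break (l : String) (rest code : List String)
    (h1 : PySem.Str.startswith (PySem.Str.lstrip l) ">>>" = false)
    (h2 : PySem.Str.startswith (PySem.Str.lstrip l) "..." = false)
    (hno : ¬(PySem.Str.lstrip l = "" ∧ pvLook rest = true)) :
    pvAInner (l :: rest) code = (code, l :: rest) := by
  simp only [pvAInner, h1, h2, Bool.false_eq_true, if_false]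
  by_cases h3 : PySem.Str.lstrip l = ""
  · have h4 : pvLook rest = false := by
      cases hlk : pvLook rest
      · rfl
      · exact absurd ⟨h3, hlk⟩ hno
    rw [if_pos h3, if_neg (by simp [h4])]
  · rw [if_neg h3]

theorem pvAOuter_cons_gt (l : String) (rest : List String)
    (h : PySem.Str.startswith (PySem.Str.lstrip l) ">>>" = true) :
    pvAOuter (l :: rest)
      = (let p := pvAInner rest [pvCodeAfter (PySem.Str.lstrip l)];
         (if p.1.isEmpty then [] else pvFlush p.1) ++ pvAOuter p.2) := by
  rw [pvAOuter]
  simp only [h, dif_pos, pvAInner_cons_gt l rest [] h, List.nil_append, pvFlush]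
  rfl

theorem pvAOuter_cons_plain (l : String) (rest : List String)
    (h : PySem.Str.startswith (PySem.Str.lstrip l) ">>>" = false) :
    pvAOuter (l :: rest) = l :: pvAOuter rest := by
  rw [pvAOuter, dif_neg (by simp only [h, Bool.false_eq_true, not_false_eq_true])]

theorem pvBGo_cons_nilcode (l : String) (rest : List String) :
    pvBGo (l :: rest) []
      = (if PySem.Str.startswith (PySem.Str.lstrip l) ">>>" then
           pvBGo rest [pvCodeAfter (PySem.Str.lstrip l)]
         else l :: pvBGo rest []) := by
  simp only [pvBGo, List.isEmpty_nil, if_true, List.nil_append]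

theorem pvBGo_cons_keep (l : String) (rest code : List String) (hc : code ≠ [])
    (h : (PySem.Str.startswith (PySem.Str.lstrip l) ">>>"
          || PySem.Str.startswith (PySem.Str.lstrip l) "...") = true) :
    pvBGo (l :: rest) code = pvBGo rest (code ++ [pvCodeAfter (PySem.Str.lstrip l)]) := by
  have hce : code.isEmpty = false := by simpa [List.isEmpty_iff] using hc
  simp only [pvBGo, hce, h, Bool.false_eq_true, if_false, if_true]

theorem pvBGo_cons_blank_keep (l : String) (rest code : List String) (hc : code ≠ [])
    (h1 : PySem.Str.startswith (PySem.Str.lstrip l) ">>>" = false)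
    (h2 : PySem.Str.startswith (PySem.Str.lstrip l) "..." = false)
    (h3 : PySem.Str.lstrip l = "") (h4 : pvLook rest = true) :
    pvBGo (l :: rest) code = pvBGo rest (code ++ [""]) := by
  have hce : code.isEmpty = false := by simpa [List.isEmpty_iff] using hc
  simp only [pvBGo, hce, h1, h2, Bool.false_or, Bool.false_eq_true, if_false]
  rw [if_pos ⟨h3, h4⟩]

theorem pvBGo_cons_flush (l : String) (rest code : List String) (hc : code ≠ [])
    (h1 : PySem.Str.startswith (PySem.Str.lstrip l) ">>>" = false)
    (h2 : PySem.Str.startswith (PySem.Str.lstrip l) "..." = false)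
    (hno : ¬(PySem.Str.lstrip l = "" ∧ pvLook rest = true)) :
    pvBGo (l :: rest) code = pvFlush code ++ (l :: pvBGo rest []) := by
  have hce : code.isEmpty = false := by simpa [List.isEmpty_iff] using hc
  simp only [pvBGo, hce, h1, h2, Bool.false_or, Bool.false_eq_true, if_false]
  rw [if_neg hno]

theorem pvMain : ∀ (n : ℕ) (xs : List String), xs.length ≤ n →
    (pvAOuter xs = pvBGo xs []) ∧
    (∀ code, code ≠ [] →
      (let p := pvAInner xs code;
       (if p.1.isEmpty then [] else pvFlush p.1) ++ pvAOuter p.2) = pvBGo xs code) := by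
  intro n
  induction n with
  | zero =>
    intro xs hlen
    have hxs : xs = [] := List.length_eq_zero_iff.mp (Nat.le_zero.mp hlen)
    subst hxs
    constructor
    · simp [pvAOuter, pvBGo]
    · intro code hc
      have hce : code.isEmpty = false := by simpa [List.isEmpty_iff] using hc
      simp [pvAInner, pvAOuter, pvBGo, hce]
  | succ n ih =>
    intro xs hlen
    cases xs with
    | nil =>
      constructor
      · simp [pvAOuter, pvBGo]
      · intro code hc
        have hce : code.isEmpty = false := by simpa [List.isEmpty_iff] using hc
        simp [pvAInner, pvAOuter, pvBGo, hce]
    | cons l rest =>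
      have hr : rest.length ≤ n := by
        simpa using Nat.succ_le_succ_iff.mp (by simpa using hlen)
      obtain ⟨Pr, Qr⟩ := ih rest hr
      constructor
      · -- outer loop on l :: rest with empty buffer
        by_cases h : PySem.Str.startswith (PySem.Str.lstrip l) ">>>" = true
        · rw [pvAOuter_cons_gt l rest h, pvBGo_cons_nilcode, if_pos h]
          exact Qr [pvCodeAfter (PySem.Str.lstrip l)] (by simp)
        · rw [pvAOuter_cons_plain l rest (by simpa using h),
              pvBGo_cons_nilcode, if_neg (by simpa using h), Pr]
      · -- in-block agreement
        intro code hc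
        by_cases h1 : PySem.Str.startswith (PySem.Str.lstrip l) ">>>" = true
        · rw [pvAInner_cons_gt l rest code h1,
              pvBGo_cons_keep l rest code hc (by simp only [h1, Bool.true_or])]
          exact Qr _ (by simp)
        · have h1' : PySem.Str.startswith (PySem.Str.lstrip l) ">>>" = false := by
            simpa using h1
          by_cases h2 : PySem.Str.startswith (PySem.Str.lstrip l) "..." = true
          · rw [pvAInner_cons_dots l rest code h1' h2,
                pvBGo_cons_keep l rest code hc (by simp only [h1', h2, Bool.false_or])]
            exact Qr _ (by simp)
          · have h2' : PySem.Str.startswith (PySem.Str.lstrip l) "..." = false := by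
              simpa using h2
            by_cases hbk : PySem.Str.lstrip l = "" ∧ pvLook rest = true
            · rw [pvAInner_cons_blank_keep l rest code h1' h2' hbk.1 hbk.2,
                  pvBGo_cons_blank_keep l rest code hc h1' h2' hbk.1 hbk.2]
              exact Qr _ (by simp)
            · have hce : code.isEmpty = false := by simpa [List.isEmpty_iff] using hc
              rw [pvBGo_cons_flush l rest code hc h1' h2' hbk]
              simp only [pvAInner_cons_break l rest code h1' h2' hbk, hce,
                Bool.false_eq_true, if_false]
              rw [pvAOuter_cons_plain l rest h1', Pr]

theorem convert_doctest_to_codeblock_eq (docstring : String) :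
    convert_doctest_to_codeblock docstring = convert_doctest_to_codeblock_alt docstring := by
  unfold convert_doctest_to_codeblock convert_doctest_to_codeblock_alt
  rw [(pvMain _ _ le_rfl).1]

-- ===== VERDICT (by name: the statement is the Claim_ definition above) =====
theorem convert_doctest_to_codeblock_spec : Claim_equal_convert_doctest_to_codeblock := by
  intro d _
  exact convert_doctest_to_codeblock_eq d
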